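-- pv_equiv track=rewrite | github.com/bambooheng/finish-bbva-pdf-parser_without_detail | src/export/excel_exporter.py | _build_dynamic_column_mapping
-- ===== SOURCE A (Python) =====
-- from typing import Dict, List, Optional
--
-- def _build_dynamic_column_mapping(headers: List[str]) -> Dict[str, str]:
--     """
--     Build mapping from header names to transaction field names.
--
--     Args:
--         headers: List of original table headers
--
--     Returns:
--         Dictionary mapping header index/name to field name
--     """
--     mapping = {}
--     for idx, header in enumerate(headers):
--         header_lower = header.lower().strip()
--         # Map to semantic field names (used internally, not exposed)
--         if any(keyword in header_lower for keyword in ["fecha", "date"]):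
--             if "oper" in header_lower:
--                 mapping[idx] = "oper_date"
--             elif "liq" in header_lower:
--                 mapping[idx] = "liq_date"
--             else:
--                 mapping[idx] = "date"
--         elif any(keyword in header_lower for keyword in ["descripcion", "description"]):
--             mapping[idx] = "description"
--         elif any(keyword in header_lower for keyword in ["referencia", "ref"]):
--             mapping[idx] = "reference"
--         elif any(keyword in header_lower for keyword in ["cargos"]):
--             mapping[idx] = "cargos"
--         elif any(keyword in header_lower for keyword in ["abonos"]):
--             mapping[idx] = "abonos"
--         elif any(keyword in header_lower for keyword in ["operacion"]):
--             mapping[idx] = "operacion"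
--         elif any(keyword in header_lower for keyword in ["liquidacion"]):
--             mapping[idx] = "liquidacion"
--         elif any(keyword in header_lower for keyword in ["saldo", "balance"]):
--             mapping[idx] = "balance"
--         elif any(keyword in header_lower for keyword in ["importe", "monto", "amount"]):
--             mapping[idx] = "amount"
--
--     return mapping
-- ===== SOURCE B (Python) =====
-- from typing import Dict, List, Optional
--
-- _RULES = [
--     (["fecha", "date"], "date"),
--     (["descripcion", "description"], "description"),
--     (["referencia", "ref"], "reference"),
--     (["cargos"], "cargos"),
--     (["abonos"], "abonos"),
--     (["operacion"], "operacion"),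
--     (["liquidacion"], "liquidacion"),
--     (["saldo", "balance"], "balance"),
--     (["importe", "monto", "amount"], "amount"),
-- ]
--
--
-- def _refine(header_lower, field):
--     # the date rule is refined by oper/liq sub-markers
--     if field == "date":
--         if "oper" in header_lower:
--             return "oper_date"
--         if "liq" in header_lower:
--             return "liq_date"
--         return "date"
--     return field
--
--
-- def _build_dynamic_column_mapping(headers: List[str]) -> Dict[str, str]:
--     # Transposed, rule-major sweep: each rule, in precedence order, claims every
--     # still-unclaimed header it matches; the claim table is then emitted in index order.
--     lows = [h.lower().strip() for h in headers]
--     claimed = {}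
--     for keywords, field in _RULES:
--         for idx, hl in enumerate(lows):
--             if idx not in claimed and any(k in hl for k in keywords):
--                 claimed[idx] = _refine(hl, field)
--     return {idx: claimed[idx] for idx in sorted(claimed)}
-- ===== Notes on version B (the rewrite author's own statement) =====
-- stated objective: alternative
-- what changed: Transposes the loop nesting: instead of classifying each header by an elif cascade, B sweeps rule-by-rule (in precedence order) over the normalized headers, letting each rule claim every still-unclaimed matching index, then emits the claim table in sorted index order.
import Mathlib
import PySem

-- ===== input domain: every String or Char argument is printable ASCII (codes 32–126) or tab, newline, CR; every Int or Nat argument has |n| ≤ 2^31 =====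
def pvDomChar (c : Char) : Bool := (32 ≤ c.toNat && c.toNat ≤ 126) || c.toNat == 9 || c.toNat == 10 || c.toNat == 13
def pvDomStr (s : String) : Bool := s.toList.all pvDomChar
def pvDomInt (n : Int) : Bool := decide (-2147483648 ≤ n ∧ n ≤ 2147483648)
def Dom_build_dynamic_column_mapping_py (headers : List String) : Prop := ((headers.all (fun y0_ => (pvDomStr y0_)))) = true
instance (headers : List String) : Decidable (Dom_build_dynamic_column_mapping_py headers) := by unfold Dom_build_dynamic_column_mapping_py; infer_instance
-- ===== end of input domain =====

-- B transposes the loops: a rule-major sweep over normalized headers with a claim table emitted in sorted index order (alternative structure, same cost).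

-- ===== PORT A =====
-- A's elif chain on one header: mapping is the dict so far, idx the index, hl = header.lower().strip()
def pvStepA1 (mapping : PySem.Dict Int String) (idx : Int) (hl : String) : PySem.Dict Int String :=
    if ["fecha", "date"].any (fun k => PySem.Str.isIn k hl) then
      if PySem.Str.isIn "oper" hl then mapping.insert idx "oper_date"
      else if PySem.Str.isIn "liq" hl then mapping.insert idx "liq_date"
      else mapping.insert idx "date"
    else if ["descripcion", "description"].any (fun k => PySem.Str.isIn k hl) then
      mapping.insert idx "description"
    else if ["referencia", "ref"].any (fun k => PySem.Str.isIn k hl) then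
      mapping.insert idx "reference"
    else if ["cargos"].any (fun k => PySem.Str.isIn k hl) then
      mapping.insert idx "cargos"
    else if ["abonos"].any (fun k => PySem.Str.isIn k hl) then
      mapping.insert idx "abonos"
    else if ["operacion"].any (fun k => PySem.Str.isIn k hl) then
      mapping.insert idx "operacion"
    else if ["liquidacion"].any (fun k => PySem.Str.isIn k hl) then
      mapping.insert idx "liquidacion"
    else if ["saldo", "balance"].any (fun k => PySem.Str.isIn k hl) then
      mapping.insert idx "balance"
    else if ["importe", "monto", "amount"].any (fun k => PySem.Str.isIn k hl) then
      mapping.insert idx "amount"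
    else mapping

-- A's loop body on one (idx, header) pair: header_lower = header.lower().strip(), then the chain
def pvStepA (mapping : PySem.Dict Int String) (p : Int × String) : PySem.Dict Int String :=
  pvStepA1 mapping p.1 (PySem.Str.strip (PySem.Str.lower p.2))

-- literal transliteration of A: the dict built by the elif chain over enumerate(headers)
def build_dynamic_column_mapping_py (headers : List String) : List (Int × String) :=
  ((PySem.List.enumerate headers).foldl pvStepA PySem.Dict.empty).items

-- ===== PORT B =====
def pvRules : List (List String × String) :=
  [ (["fecha", "date"], "date")
  , (["descripcion", "description"], "description")
  , (["referencia", "ref"], "reference")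
  , (["cargos"], "cargos")
  , (["abonos"], "abonos")
  , (["operacion"], "operacion")
  , (["liquidacion"], "liquidacion")
  , (["saldo", "balance"], "balance")
  , (["importe", "monto", "amount"], "amount") ]

-- Source B's _refine: the date rule refined by oper/liq sub-markers
def pvRefine (hl : String) (field : String) : String :=
  if field = "date" then
    if PySem.Str.isIn "oper" hl then "oper_date"
    else if PySem.Str.isIn "liq" hl then "liq_date"
    else "date"
  else field

-- Source B's inner loop: one rule claims every still-unclaimed matching index
def pvClaimRule (lows : List String) (claimed : PySem.Dict Int String)
    (rule : List String × String) : PySem.Dict Int String :=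
  (PySem.List.enumerate lows).foldl (fun d p =>
    if d.contains p.1 = false ∧ rule.1.any (fun k => PySem.Str.isIn k p.2) then
      d.insert p.1 (pvRefine p.2 rule.2)
    else d) claimed

-- literal transliteration of Source B: normalize, rule-major sweep, emit in sorted index order
-- (claimed[idx] is ported as getD with an unreachable default: every sorted key is a key of claimed)
def build_dynamic_column_mapping_py_alt (headers : List String) : List (Int × String) :=
  let lows := headers.map (fun h => PySem.Str.strip (PySem.Str.lower h))
  let claimed := pvRules.foldl (pvClaimRule lows) PySem.Dict.empty
  ((PySem.List.sorted claimed.keys (fun x => x) false).foldl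
      (fun d k => d.insert k (claimed.getD k "")) PySem.Dict.empty).items

-- ===== PRECONDITION & SPEC =====
def Spec_build_dynamic_column_mapping_py (headers : List String) (out : List (Int × String)) : Prop := out = build_dynamic_column_mapping_py_alt headers
instance (headers : List String) (out : List (Int × String)) : Decidable (Spec_build_dynamic_column_mapping_py headers out) := by unfold Spec_build_dynamic_column_mapping_py; infer_instance

-- ===== CLAIM (what is proved, stated in full; the proofs are below) =====
def Claim_equal_build_dynamic_column_mapping_py : Prop := ∀ (headers : List String), Dom_build_dynamic_column_mapping_py headers → Spec_build_dynamic_column_mapping_py headers (build_dynamic_column_mapping_py headers)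

-- ===== LEMMAS AND PROOFS =====

-- first-match classification of one normalized header by a list of rules (proof-only helper)
def pvScan (hl : String) : List (List String × String) → Option String
  | [] => none
  | (kws, field) :: rest =>
    if kws.any (fun k => PySem.Str.isIn k hl) then some (pvRefine hl field)
    else pvScan hl rest

-- A's chain equals the first-matching-rule classification
set_option maxHeartbeats 1000000 in
theorem pvStepA1_eq_scan (mapping : PySem.Dict Int String) (idx : Int) (hl : String) :
    pvStepA1 mapping idx hl =
      match pvScan hl pvRules with
      | none => mapping
      | some f => mapping.insert idx f := by
  unfold pvStepA1
  simp only [pvRules, pvScan, pvRefine,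
    show ("date" = "date") = True from by decide,
    show ("description" = "date") = False from by decide,
    show ("reference" = "date") = False from by decide,
    show ("cargos" = "date") = False from by decide,
    show ("abonos" = "date") = False from by decide,
    show ("operacion" = "date") = False from by decide,
    show ("liquidacion" = "date") = False from by decide,
    show ("balance" = "date") = False from by decide,
    show ("amount" = "date") = False from by decide,
    if_true, if_false]
  split_ifs <;> rfl

-- A's fold over pairs with fresh distinct keys builds exactly the classification filterMap
theorem pv_foldl_items (l : List (Int × String)) (d : PySem.Dict Int String)
    (hfresh : ∀ q ∈ l, d.contains q.1 = false)
    (hnodup : (l.map Prod.fst).Nodup) :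
    (l.foldl pvStepA d).items =
      d.items ++ l.filterMap (fun p =>
        (pvScan (PySem.Str.strip (PySem.Str.lower p.2)) pvRules).map (fun f => (p.1, f))) := by
  induction l generalizing d with
  | nil => simp
  | cons p rest ih =>
    simp only [List.foldl_cons, List.filterMap_cons, List.map_cons, List.nodup_cons] at *
    have hfr : d.contains p.1 = false := hfresh p (by simp)
    have hrest : ∀ q ∈ rest, (pvStepA d p).contains q.1 = false := by
      intro q hq
      have hne : q.1 ≠ p.1 := by
        intro h; exact hnodup.1 (h ▸ List.mem_map_of_mem hq)
      have := hfresh q (by simp [hq])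
      simp only [pvStepA]
      rw [pvStepA1_eq_scan]
      cases pvScan (PySem.Str.strip (PySem.Str.lower p.2)) pvRules with
      | none => simpa using this
      | some f => simp [PySem.Dict.contains_insert, this, hne]
    rw [ih _ hrest hnodup.2]
    simp only [pvStepA]
    rw [pvStepA1_eq_scan]
    cases pvScan (PySem.Str.strip (PySem.Str.lower p.2)) pvRules with
    | none => simp
    | some f => simp [PySem.Dict.items_insert, hfr]

-- B's inner fold (one rule) seen through get?: first occurrence of a fresh matching index claims it
theorem pv_get?_claim_inner (r : List String × String) (l : List (Int × String))
    (d : PySem.Dict Int String) (i : Int) (hnd : (l.map Prod.fst).Nodup) :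
    ((l.foldl (fun d p =>
        if d.contains p.1 = false ∧ r.1.any (fun k => PySem.Str.isIn k p.2) then
          d.insert p.1 (pvRefine p.2 r.2)
        else d) d).get? i) =
      (d.get? i).or ((l.find? (fun p => p.1 == i)).bind (fun p =>
        if r.1.any (fun k => PySem.Str.isIn k p.2) then some (pvRefine p.2 r.2) else none)) := by
  induction l generalizing d with
  | nil => simp
  | cons p rest ih =>
    simp only [List.map_cons, List.nodup_cons] at hnd
    simp only [List.foldl_cons, List.find?_cons]
    by_cases hpi : p.1 = i
    · subst hpi
      have hfind : rest.find? (fun q => q.1 == p.1) = none := by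
        rw [List.find?_eq_none]
        intro q hq
        simp only [beq_iff_eq]
        exact fun h => hnd.1 (h ▸ List.mem_map_of_mem hq)
      rw [ih _ hnd.2, hfind]
      simp only [beq_self_eq_true, Option.or_none, Option.bind]
      by_cases hm : (r.1.any fun k => PySem.Str.isIn k p.2) = true
      · by_cases hc : d.contains p.1 = false
        · rw [if_pos ⟨hc, hm⟩, if_pos hm, PySem.Dict.get?_insert_self]
          have hn : d.get? p.1 = none := by
            rw [PySem.Dict.contains_eq_isSome_get?] at hc
            cases h : d.get? p.1 with
            | none => rfl
            | some v => rw [h] at hc; simp at hc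
          rw [hn]
          rfl
        · rw [if_neg (fun hand => hc hand.1), if_pos hm]
          have hs : (d.get? p.1).isSome := by
            rw [PySem.Dict.contains_eq_isSome_get?] at hc
            cases h : d.get? p.1 with
            | none => rw [h] at hc; simp at hc
            | some v => simp
          cases h : d.get? p.1 with
          | none => rw [h] at hs; simp at hs
          | some v => rfl
      · rw [if_neg (fun hand => hm hand.2), if_neg hm]
        rw [Option.or_none]
    · have hbe : (p.1 == i) = false := by simp [hpi]
      rw [ih _ hnd.2, hbe]
      simp only [Bool.false_eq_true, if_false]
      congr 1
      split_ifs with h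
      · exact PySem.Dict.get?_insert_of_ne _ _ (Ne.symm hpi)
      · rfl

-- find? on enumerate: index i = s + k hits lows[k]
theorem pv_find?_enumerate (lows : List String) (s : Int) (k : Nat) (hk : k < lows.length) :
    ((PySem.List.enumerate lows s).find? (fun p => p.1 == s + (k : Int))) = some (s + k, lows[k]) := by
  induction lows generalizing s k with
  | nil => simp at hk
  | cons x xs ih =>
    rw [PySem.List.enumerate_cons, List.find?_cons]
    cases k with
    | zero => simp
    | succ m =>
      have hne : (s == s + ((m : Int) + 1)) = false := by simp; omega
      have : s + ((m : Nat) + 1 : Nat) = (s + 1) + (m : Nat) := by push_cast; ring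
      simp only [Nat.cast_add, Nat.cast_one, hne, Bool.false_eq_true, not_false_eq_true,
        if_neg]
      have := ih (s + 1) m (by simpa using hk)
      rw [show s + ((m : Int) + 1) = (s + 1) + (m : Int) from by ring]
      simpa using this

-- find? on enumerate misses indices outside the range
theorem pv_find?_enumerate_none (lows : List String) (s : Int) (i : Int)
    (h : ∀ k : Nat, k < lows.length → i ≠ s + k) :
    ((PySem.List.enumerate lows s).find? (fun p => p.1 == i)) = none := by
  rw [List.find?_eq_none]
  intro p hp
  rw [PySem.List.mem_enumerate_iff] at hp
  obtain ⟨k, hk, rfl⟩ := hp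
  simp only [beq_iff_eq]
  exact fun hh => h k hk hh.symm

-- keys of any dict stay Nodup through B's guarded-insert folds
theorem pv_nodup_keys_claim (l : List (ν × String)) (d : PySem.Dict ν String) [BEq ν] [LawfulBEq ν]
    (r : List String × String) (h : d.keys.Nodup) :
    ((l.foldl (fun d p =>
        if d.contains p.1 = false ∧ r.1.any (fun k => PySem.Str.isIn k p.2) then
          d.insert p.1 (pvRefine p.2 r.2)
        else d) d).keys).Nodup := by
  induction l generalizing d with
  | nil => exact h
  | cons p rest ih =>
    simp only [List.foldl_cons]
    apply ih
    split_ifs with hc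
    · exact PySem.Dict.nodup_keys_insert _ _ _ h
    · exact h

theorem pv_nodup_keys_claim_rules (rs : List (List String × String)) (lows : List String)
    (d : PySem.Dict Int String) (h : d.keys.Nodup) :
    ((rs.foldl (pvClaimRule lows) d).keys).Nodup := by
  induction rs generalizing d with
  | nil => exact h
  | cons r rest ih =>
    simp only [List.foldl_cons]
    exact ih _ (pv_nodup_keys_claim _ _ _ h)

-- get? after the whole rule-major sweep = first-matching-rule classification of lows[i]
theorem pv_get?_claim_rules (rs : List (List String × String)) (lows : List String)
    (d : PySem.Dict Int String) (i : Int) :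
    ((rs.foldl (pvClaimRule lows) d).get? i) =
      (d.get? i).or ((if 0 ≤ i then lows[i.toNat]? else none).bind (fun hl => pvScan hl rs)) := by
  induction rs generalizing d with
  | nil =>
    have : ((if 0 ≤ i then lows[i.toNat]? else none).bind (fun hl => pvScan hl [])) = none := by
      cases (if 0 ≤ i then lows[i.toNat]? else none) <;> simp [pvScan]
    rw [this, Option.or_none]
    rfl
  | cons r rest ih =>
    simp only [List.foldl_cons]
    rw [ih]
    unfold pvClaimRule
    rw [pv_get?_claim_inner r _ d i (by
      rw [PySem.List.map_fst_enumerate]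
      exact PySem.List.nodup_pyRange_one _ _)]
    rw [Option.or_assoc]
    congr 1
    by_cases hex : ∃ k : Nat, k < lows.length ∧ i = (k : Int)
    · obtain ⟨k, hk, rfl⟩ := hex
      have hfind := pv_find?_enumerate lows 0 k hk
      rw [zero_add] at hfind
      rw [hfind]
      have hidx : (if (0:Int) ≤ (k : Int) then lows[((k : Int)).toNat]? else none) = some lows[k] := by
        rw [if_pos (by positivity), Int.toNat_natCast, List.getElem?_eq_getElem hk]
      rw [hidx]
      simp only [Option.bind_some]
      rw [pvScan]
      split_ifs with hm <;> simp
    · have hfind := pv_find?_enumerate_none lows 0 i (by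
        intro k hk hik
        exact hex ⟨k, hk, by omega⟩)
      rw [hfind]
      have hidx : (if 0 ≤ i then lows[i.toNat]? else none) = none := by
        split_ifs with h0
        · rw [List.getElem?_eq_none]
          by_contra hlt
          push_neg at hlt
          exact hex ⟨i.toNat, by omega, by omega⟩
        · rfl
      rw [hidx]
      rfl

-- the classification of any pair of enumerate lows, through the claim table
theorem pv_get?_enumerate (lows : List String) (p : Int × String)
    (hp : p ∈ PySem.List.enumerate lows) :
    ((pvRules.foldl (pvClaimRule lows) PySem.Dict.empty).get? p.1) = pvScan p.2 pvRules := by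
  rw [PySem.List.mem_enumerate_iff] at hp
  obtain ⟨k, hk, rfl⟩ := hp
  rw [pv_get?_claim_rules, PySem.Dict.get?_empty, Option.none_or]
  simp only [zero_add]
  rw [if_pos (by positivity), Int.toNat_natCast, List.getElem?_eq_getElem hk]
  rfl

-- filterMap returning the index exactly when classification succeeds = map fst of filter
theorem pv_filterMap_if (l : List (Int × String)) (c : (Int × String) → Bool) :
    l.filterMap (fun p => if c p then some p.1 else none) = (l.filter c).map Prod.fst := by
  induction l with
  | nil => rfl
  | cons p rest ih =>
    by_cases h : c p <;> simp [List.filterMap_cons, List.filter_cons, h, ih]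

-- the classified index list is a Nodup ascending sublist of enumerate's indices
theorem pv_ks_nodup (lows : List String) (c : (Int × String) → Bool) :
    (((PySem.List.enumerate lows).filter c).map Prod.fst).Nodup := by
  have hsub : (((PySem.List.enumerate lows).filter c).map Prod.fst).Sublist
      ((PySem.List.enumerate lows).map Prod.fst) :=
    List.Sublist.map Prod.fst List.filter_sublist
  apply hsub.nodup
  rw [PySem.List.map_fst_enumerate]
  exact PySem.List.nodup_pyRange_one _ _

-- the index list of the claimed table, sorted, in ascending enumerate order
theorem pv_sorted_keys (lows : List String) :
    PySem.List.sorted ((pvRules.foldl (pvClaimRule lows) PySem.Dict.empty).keys) (fun x => x) false =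
      (PySem.List.enumerate lows).filterMap (fun p =>
        if (pvScan p.2 pvRules).isSome then some p.1 else none) := by
  rw [pv_filterMap_if]
  have hpairwise : (((PySem.List.enumerate lows).filter
        (fun p => (pvScan p.2 pvRules).isSome)).map Prod.fst).Pairwise (· < ·) := by
    rw [List.pairwise_map]
    exact List.Pairwise.sublist List.filter_sublist (PySem.List.pairwise_lt_enumerate _ _)
  apply PySem.List.sorted_id_eq_of_perm_of_pairwise
  · apply (List.perm_ext_iff_of_nodup (pv_ks_nodup _ _) ?_).mpr
    · intro i
      rw [List.mem_map]
      constructor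
      · rintro ⟨p, hp, rfl⟩
        rw [List.mem_filter] at hp
        obtain ⟨hpmem, hps⟩ := hp
        rw [← PySem.Dict.contains_iff_mem_keys, PySem.Dict.contains_eq_isSome_get?,
          pv_get?_enumerate lows p hpmem]
        simpa using hps
      · intro hi
        rw [← PySem.Dict.contains_iff_mem_keys, PySem.Dict.contains_eq_isSome_get?,
          pv_get?_claim_rules, PySem.Dict.get?_empty, Option.none_or] at hi
        split_ifs at hi with h0
        · cases hg : lows[i.toNat]? with
          | none => rw [hg] at hi; simp at hi
          | some hl =>
            rw [hg] at hi
            simp only [Option.bind_some] at hi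
            have hk : i.toNat < lows.length := (List.getElem?_eq_some_iff.mp hg).choose
            refine ⟨((i.toNat : Int), lows[i.toNat]'hk), ?_, by simp; omega⟩
            rw [List.mem_filter]
            constructor
            · rw [PySem.List.mem_enumerate_iff]
              exact ⟨i.toNat, hk, by simp⟩
            · have : lows[i.toNat]'hk = hl := by
                have := List.getElem?_eq_getElem hk
                rw [hg] at this
                exact (Option.some_inj.mp this).symm
              simpa [this] using hi
        · simp at hi
    · exact pv_nodup_keys_claim_rules _ _ _ (by simp)
  · exact hpairwise.imp le_of_lt

-- emitting the claim table over the classified indices reconstructs the classification pairs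
theorem pv_emit (claimed : PySem.Dict Int String) (l : List (Int × String))
    (h : ∀ p ∈ l, claimed.get? p.1 = pvScan p.2 pvRules) :
    (l.filterMap (fun p => if (pvScan p.2 pvRules).isSome then some p.1 else none)).map
        (fun k => (k, claimed.getD k "")) =
      l.filterMap (fun p => (pvScan p.2 pvRules).map (fun f => (p.1, f))) := by
  induction l with
  | nil => rfl
  | cons p rest ih =>
    have hp := h p (by simp)
    have hrest := ih (fun q hq => h q (by simp [hq]))
    cases hs : pvScan p.2 pvRules with
    | none => simp [List.filterMap_cons, hs, hrest]
    | some f =>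
      simp only [List.filterMap_cons, hs, Option.isSome_some, if_pos, List.map_cons,
        Option.map_some]
      rw [hrest, PySem.Dict.getD_eq_get?_getD, hp, hs]
      rfl

-- A as a classification filterMap
theorem pv_A_char (headers : List String) :
    build_dynamic_column_mapping_py headers =
      (PySem.List.enumerate headers).filterMap (fun p =>
        (pvScan (PySem.Str.strip (PySem.Str.lower p.2)) pvRules).map (fun f => (p.1, f))) := by
  unfold build_dynamic_column_mapping_py
  rw [pv_foldl_items _ _ (fun q _ => by simp)
    (by rw [PySem.List.map_fst_enumerate]; exact PySem.List.nodup_pyRange_one _ _)]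
  rw [show (PySem.Dict.empty : PySem.Dict Int String).items = [] from rfl, List.nil_append]

-- B as the same classification filterMap over the normalized headers
theorem pv_B_char (headers : List String) :
    build_dynamic_column_mapping_py_alt headers =
      (PySem.List.enumerate (headers.map (fun h => PySem.Str.strip (PySem.Str.lower h)))).filterMap (fun p =>
        (pvScan p.2 pvRules).map (fun f => (p.1, f))) := by
  show ((PySem.List.sorted
      ((pvRules.foldl (pvClaimRule (headers.map (fun h => PySem.Str.strip (PySem.Str.lower h)))) PySem.Dict.empty).keys) (fun x => x) false).foldl
      (fun d k => d.insert k
        ((pvRules.foldl (pvClaimRule (headers.map (fun h => PySem.Str.strip (PySem.Str.lower h)))) PySem.Dict.empty).getD k ""))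
      PySem.Dict.empty).items = _
  generalize (headers.map (fun h => PySem.Str.strip (PySem.Str.lower h))) = lows
  rw [pv_sorted_keys lows]
  rw [PySem.Dict.items_foldl_insert_fresh _ (fun x => x)
    (fun k => (pvRules.foldl (pvClaimRule lows) PySem.Dict.empty).getD k "")
    PySem.Dict.empty (fun a _ => by simp)
    (by rw [List.map_id_fun', pv_filterMap_if]; exact pv_ks_nodup lows _)]
  rw [show (PySem.Dict.empty : PySem.Dict Int String).items = [] from rfl, List.nil_append]
  exact pv_emit _ _ (fun p hp => pv_get?_enumerate lows p hp)

-- enumerating the pre-normalized list classifies like normalizing on the fly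
theorem pv_bridge (l : List String) (s : Int) :
    (PySem.List.enumerate (l.map (fun h => PySem.Str.strip (PySem.Str.lower h))) s).filterMap
        (fun p => (pvScan p.2 pvRules).map (fun f => (p.1, f))) =
      (PySem.List.enumerate l s).filterMap
        (fun p => (pvScan (PySem.Str.strip (PySem.Str.lower p.2)) pvRules).map (fun f => (p.1, f))) := by
  induction l generalizing s with
  | nil => simp
  | cons x t ih =>
    rw [List.map_cons, PySem.List.enumerate_cons, PySem.List.enumerate_cons,
      List.filterMap_cons, List.filterMap_cons, ih]

-- ===== VERDICT (by name: the statement is the Claim_ definition above) =====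
theorem build_dynamic_column_mapping_py_spec : Claim_equal_build_dynamic_column_mapping_py := by
  intro headers _
  show build_dynamic_column_mapping_py headers = build_dynamic_column_mapping_py_alt headers
  rw [pv_A_char, pv_B_char, pv_bridge]
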